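-- pv_equiv track=rewrite | github.com/nikhilmeghnani/problem-solving | find_unique_words_in_string.py | find_unique_words
-- ===== SOURCE A (Python) =====
-- def find_unique_words(input_str):
--     dict = {}
--     output_list = []
--     for item in input_str.split():
--         if item not in dict:
--             dict[item] = 1
--         else:
--             dict[item] = dict[item] + 1
--
--     for key, value in dict.items():
--         if value == 1:
--             output_list.append(key)
--     return output_list
-- ===== SOURCE B (Python) =====
-- def find_unique_words(input_str):
--     tokens = input_str.split()
--     seen = set()
--     duplicated = set()
--     for w in tokens:
--         if w in seen:
--             duplicated.add(w)
--         else: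
--             seen.add(w)
--     return [w for w in tokens if w not in duplicated]
-- ===== Notes on version B (the rewrite author's own statement) =====
-- stated objective: idiomatic
-- what changed: Replaces the counting dict and the dict.items second pass with two membership sets (seen/duplicated) built in one pass and a filter over the raw token list, which preserves first-occurrence order without counting.
import Mathlib
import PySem

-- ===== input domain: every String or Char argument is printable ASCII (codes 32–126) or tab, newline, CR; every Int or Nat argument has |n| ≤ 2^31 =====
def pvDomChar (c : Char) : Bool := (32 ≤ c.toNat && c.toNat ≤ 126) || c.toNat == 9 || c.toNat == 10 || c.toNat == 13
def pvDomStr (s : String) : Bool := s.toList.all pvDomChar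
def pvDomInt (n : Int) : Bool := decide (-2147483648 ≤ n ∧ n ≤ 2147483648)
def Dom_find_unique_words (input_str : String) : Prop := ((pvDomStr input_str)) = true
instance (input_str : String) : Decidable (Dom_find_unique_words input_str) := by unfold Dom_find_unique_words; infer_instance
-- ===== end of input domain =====

-- B replaces A's counting dict + dict.items pass with two membership sets (seen/duplicated)
-- built in one pass and a filter over the raw token list (same order, same values; idiomatic).

-- ===== PORT A =====
-- literal port of A: count tokens in a dict, then collect keys with value 1 in insertion order.
-- (dict[item] inside the 'else' branch is ported as getD item 0: the branch guarantees the key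
-- is present, so the value is identical and no KeyError can occur.)
def find_unique_words (input_str : String) : List String :=
  let d := (PySem.Str.split₀ input_str).foldl
    (fun d item =>
      if d.contains item = false then d.insert item (1 : Int)
      else d.insert item (d.getD item 0 + 1))
    PySem.Dict.empty
  d.items.foldl (fun out p => if p.2 == 1 then out ++ [p.1] else out) []

-- ===== PORT B =====
def find_unique_words_alt (input_str : String) : List String :=
  let tokens := PySem.Str.split₀ input_str
  let sd := tokens.foldl
    (fun (sd : PySem.Set String × PySem.Set String) w =>
      if PySem.Set.contains sd.1 w then (sd.1, PySem.Set.add sd.2 w)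
      else (PySem.Set.add sd.1 w, sd.2))
    (PySem.Set.empty, PySem.Set.empty)
  tokens.filter (fun w => !(PySem.Set.contains sd.2 w))

-- ===== PRECONDITION & SPEC =====
def Spec_find_unique_words (input_str : String) (out : List String) : Prop := out = find_unique_words_alt input_str
instance (input_str : String) (out : List String) : Decidable (Spec_find_unique_words input_str out) := by unfold Spec_find_unique_words; infer_instance

-- ===== CLAIM (what is proved, stated in full; the proofs are below) =====
def Claim_equal_find_unique_words : Prop := ∀ (input_str : String), Dom_find_unique_words input_str → Spec_find_unique_words input_str (find_unique_words input_str)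

-- ===== LEMMAS AND PROOFS =====

-- A's branching counting loop is the canonical counter fold.
theorem countLoop_eq_counter (l : List String) :
    ∀ d : PySem.Dict String Int,
      l.foldl (fun d item =>
        if d.contains item = false then d.insert item (1 : Int)
        else d.insert item (d.getD item 0 + 1)) d
      = l.foldl (fun d x => d.insert x (d.getD x 0 + 1)) d := by
  induction l with
  | nil => intro d; rfl
  | cons x xs ih =>
    intro d
    simp only [List.foldl_cons]
    by_cases hc : d.contains x = false
    · rw [if_pos hc, ih, PySem.Dict.getD_of_not_contains d 0 hc]
      norm_num
    · rw [if_neg hc, ih]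

-- A's output loop is a filter-and-project.
theorem outLoop_eq_filter (items : List (String × Int)) :
    items.foldl (fun out p => if p.2 == 1 then out ++ [p.1] else out) []
      = (items.filter (fun p => p.2 == 1)).map (fun p => p.1) := by
  simpa using PySem.List.foldl_append_if (fun p : String × Int => p.2 == 1) (fun p => p.1) items []

theorem add_of_not_mem (s : List String) (x : String) (h : x ∉ s) :
    PySem.Set.add s x = s ++ [x] := by simp [PySem.Set.add, h]

theorem add_of_mem (s : List String) (x : String) (h : x ∈ s) :
    PySem.Set.add s x = s := by simp [PySem.Set.add, h]

-- filtering a dedup set equals filtering the raw list when the predicate only holds on count-1 elements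
theorem foldl_add_filter (p : String → Bool) (l : List String) :
    ∀ s : List String, (∀ w, p w = true → s.count w + l.count w ≤ 1) →
      (l.foldl PySem.Set.add s).filter p = s.filter p ++ l.filter p := by
  induction l with
  | nil => intro s _; simp
  | cons x xs ih =>
    intro s hs
    simp only [List.foldl_cons]
    by_cases hpx : p x = true
    · have h1 := hs x hpx
      rw [List.count_cons_self] at h1
      have hxmem : x ∉ s := by
        intro hmem
        have := List.count_pos_iff.mpr hmem
        omega
      rw [add_of_not_mem s x hxmem, ih (s ++ [x]) (by
        intro w hw
        have h2 := hs w hw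
        rw [List.count_append, List.count_cons] at *
        by_cases hwx : x = w <;> simp [hwx] at * <;> omega)]
      simp [List.filter_append, hpx, List.append_assoc]
    · have hpx' : p x = false := by simpa using hpx
      have hadd : (PySem.Set.add s x).filter p = s.filter p := by
        by_cases hxmem : x ∈ s
        · rw [add_of_mem s x hxmem]
        · rw [add_of_not_mem s x hxmem]; simp [List.filter_append, hpx']
      rw [ih (PySem.Set.add s x) (by
        intro w hw
        have h2 := hs w hw
        have hwx : w ≠ x := by rintro rfl; rw [hw] at hpx'; cases hpx'
        have hcadd : (PySem.Set.add s x).count w = s.count w := by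
          by_cases hxmem : x ∈ s
          · rw [add_of_mem s x hxmem]
          · rw [add_of_not_mem s x hxmem, List.count_append]
            simp [Ne.symm hwx]
        rw [List.count_cons] at h2
        rw [hcadd]
        by_cases hxw : x = w
        · exact absurd hxw.symm hwx
        · simp [hxw] at h2; omega), hadd]
      simp [hpx']

-- the duplicated-set invariant of B's loop: membership in the second component counts occurrences ≥ 2
theorem dupLoop_mem (l : List String) :
    ∀ (s d : PySem.Set String) (w : String),
      (w ∈ (l.foldl
        (fun (sd : PySem.Set String × PySem.Set String) w =>
          if PySem.Set.contains sd.1 w then (sd.1, PySem.Set.add sd.2 w)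
          else (PySem.Set.add sd.1 w, sd.2)) (s, d)).2)
      ↔ (w ∈ d ∨ (w ∈ s ∧ w ∈ l) ∨ 2 ≤ l.count w) := by
  induction l with
  | nil => intro s d w; simp
  | cons x xs ih =>
    intro s d w
    simp only [List.foldl_cons]
    by_cases hx : x ∈ s
    · rw [if_pos (((PySem.Set.contains_iff _ _).mpr hx))]
      rw [ih]
      rw [PySem.Set.mem_add]
      constructor
      · rintro ((hd | rfl) | ⟨hws, hwxs⟩ | hcnt)
        · exact Or.inl hd
        · exact Or.inr (Or.inl ⟨hx, List.mem_cons_self⟩)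
        · exact Or.inr (Or.inl ⟨hws, List.mem_cons_of_mem _ hwxs⟩)
        · refine Or.inr (Or.inr ?_)
          rw [List.count_cons]; split <;> omega
      · rintro (hd | ⟨hws, hwl⟩ | hcnt)
        · exact Or.inl (Or.inl hd)
        · rcases List.mem_cons.mp hwl with rfl | hwxs
          · exact Or.inl (Or.inr rfl)
          · exact Or.inr (Or.inl ⟨hws, hwxs⟩)
        · by_cases hwx : w = x
          · exact Or.inl (Or.inr hwx)
          · refine Or.inr (Or.inr ?_)
            rw [List.count_cons] at hcnt
            simp [Ne.symm hwx] at hcnt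
            omega
    · rw [if_neg (by simp [hx])]
      rw [ih]
      rw [PySem.Set.mem_add]
      by_cases hwx : w = x
      · subst hwx
        have hmemcnt : w ∈ xs ↔ 1 ≤ xs.count w := by
          rw [← List.count_pos_iff]; omega
        rw [List.count_cons_self]
        constructor
        · rintro (hd | ⟨_, hwxs⟩ | hcnt)
          · exact Or.inl hd
          · refine Or.inr (Or.inr ?_); have := hmemcnt.mp hwxs; omega
          · refine Or.inr (Or.inr ?_); omega
        · rintro (hd | ⟨hws, _⟩ | hcnt)
          · exact Or.inl hd
          · exact absurd hws hx
          · have hge : 1 ≤ xs.count w := by omega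
            exact Or.inr (Or.inl ⟨Or.inr rfl, hmemcnt.mpr hge⟩)
      · have hcc : List.count w (x :: xs) = List.count w xs := by
          simp [Ne.symm hwx]
        rw [hcc]
        constructor
        · rintro (hd | ⟨hws | rfl, hwxs⟩ | hcnt)
          · exact Or.inl hd
          · exact Or.inr (Or.inl ⟨hws, List.mem_cons_of_mem _ hwxs⟩)
          · exact absurd rfl hwx
          · exact Or.inr (Or.inr hcnt)
        · rintro (hd | ⟨hws, hwl⟩ | hcnt)
          · exact Or.inl hd
          · rcases List.mem_cons.mp hwl with rfl | hwxs
            · exact absurd rfl hwx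
            · exact Or.inr (Or.inl ⟨Or.inl hws, hwxs⟩)
          · exact Or.inr (Or.inr hcnt)

-- ===== VERDICT (by name: the statement is the Claim_ definition above) =====
theorem find_unique_words_spec : Claim_equal_find_unique_words := by
  intro input_str _
  unfold Spec_find_unique_words find_unique_words find_unique_words_alt
  set ws := PySem.Str.split₀ input_str with hws
  simp only
  rw [countLoop_eq_counter, PySem.Dict.foldl_insert_getD_add_one_eq_counter,
      outLoop_eq_filter, PySem.Dict.items_counter]
  rw [List.filter_map, List.map_map]
  have hfilter : (PySem.Set.ofList ws).filter
      ((fun p : String × Int => p.2 == 1) ∘ (fun k => (k, (ws.count k : Int))))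
      = ws.filter (fun k => (ws.count k : Int) == 1) := by
    have := foldl_add_filter (fun k => (ws.count k : Int) == 1) ws []
      (by intro w hw; simp at hw ⊢; omega)
    rw [PySem.Set.ofList_eq_foldl]
    simpa using this
  rw [hfilter]
  rw [show ((fun p : String × Int => p.1) ∘ fun k => (k, (ws.count k : Int))) = id from rfl,
      List.map_id]
  apply List.filter_congr
  intro w hw
  have hcnt : 1 ≤ ws.count w := List.count_pos_iff.mpr hw
  have hmem := dupLoop_mem ws PySem.Set.empty PySem.Set.empty w
  by_cases h2 : 2 ≤ ws.count w
  · have hin : w ∈ (ws.foldl (fun sd w =>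
        if PySem.Set.contains sd.1 w then (sd.1, PySem.Set.add sd.2 w)
        else (PySem.Set.add sd.1 w, sd.2)) (PySem.Set.empty, PySem.Set.empty)).2 := by
      rw [hmem]; exact Or.inr (Or.inr h2)
    rw [(PySem.Set.contains_iff _ _).mpr hin]
    simp only [Bool.not_true, beq_eq_false_iff_ne, ne_eq]
    intro hone
    omega
  · have hnin : w ∉ (ws.foldl (fun sd w =>
        if PySem.Set.contains sd.1 w then (sd.1, PySem.Set.add sd.2 w)
        else (PySem.Set.add sd.1 w, sd.2)) (PySem.Set.empty, PySem.Set.empty)).2 := by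
      rw [hmem]; simp [PySem.Set.empty]; omega
    have hfalse : PySem.Set.contains (ws.foldl (fun sd w =>
        if PySem.Set.contains sd.1 w then (sd.1, PySem.Set.add sd.2 w)
        else (PySem.Set.add sd.1 w, sd.2)) (PySem.Set.empty, PySem.Set.empty)).2 w = false := by
      cases hb : PySem.Set.contains (ws.foldl (fun sd w =>
          if PySem.Set.contains sd.1 w then (sd.1, PySem.Set.add sd.2 w)
          else (PySem.Set.add sd.1 w, sd.2)) (PySem.Set.empty, PySem.Set.empty)).2 w
      · rfl
      · exact absurd ((PySem.Set.contains_iff _ _).mp hb) hnin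
    rw [hfalse]
    simp only [Bool.not_false, beq_iff_eq]
    omega
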